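-- pv_equiv track=rewrite | github.com/empty-block/vibe-playlist | data/pipelines/metadata_extractor/lib/metadata_extractor.py | extract_ffm_metadata
-- ===== SOURCE A (Python) =====
-- from typing import Dict, List, Optional, Any
--
-- def extract_ffm_metadata(metadata: Dict) -> str:
--     """Extract key FFM (Feature.fm) metadata into clean format"""
--     try:
--         # Get title from Open Graph (song name)
--         title = None
--         if 'opengraph' in metadata:
--             for og_section in metadata['opengraph']:
--                 for prop in og_section.get('properties', []):
--                     if prop[0] == 'og:title':
--                         title = prop[1]
--                         break
--
--         # Get artist from description
--         artist = None
--         if 'opengraph' in metadata: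
--             for og_section in metadata['opengraph']:
--                 for prop in og_section.get('properties', []):
--                     if prop[0] == 'og:description':
--                         desc = prop[1]
--                         if desc:
--                             artist = desc.strip()
--                         break
--
--         # Get image
--         image = None
--         if 'opengraph' in metadata:
--             for og_section in metadata['opengraph']:
--                 for prop in og_section.get('properties', []):
--                     if prop[0] == 'og:image':
--                         image = prop[1]
--                         break
--
--         # Build formatted string
--         parts = []
--         if title:
--             parts.append(f"title - {title}")
--         if artist:
--             parts.append(f"artist - {artist}")
--         if image:
--             parts.append(f"image - {image}")
--
--         return " | ".join(parts) if parts else "ffm - metadata extracted"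
--
--     except Exception as e:
--         return f"ffm - extraction error: {str(e)}"
-- ===== SOURCE B (Python) =====
-- def extract_ffm_metadata(metadata):
--     """Extract key FFM (Feature.fm) metadata into clean format (single combined scan)"""
--     try:
--         title = artist = image = None
--         for og_section in metadata.get('opengraph', []):
--             t_done = d_done = i_done = False
--             for prop in og_section.get('properties', []):
--                 if t_done and d_done and i_done:
--                     break
--                 key = prop[0]
--                 if not t_done and key == 'og:title':
--                     title = prop[1]
--                     t_done = True
--                 elif not d_done and key == 'og:description':
--                     desc = prop[1]
--                     if desc:
--                         artist = desc.strip()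
--                     d_done = True
--                 elif not i_done and key == 'og:image':
--                     image = prop[1]
--                     i_done = True
--         candidates = (title and f"title - {title}",
--                       artist and f"artist - {artist}",
--                       image and f"image - {image}")
--         parts = [p for p in candidates if p]
--         return " | ".join(parts) if parts else "ffm - metadata extracted"
--     except Exception as e:
--         return f"ffm - extraction error: {str(e)}"
-- ===== Notes on version B (the rewrite author's own statement) =====
-- stated objective: alternative
-- what changed: B replaces A's three separate scans of the opengraph sections (one per og:title/og:description/og:image, each with its own inner break) by one combined pass keeping per-section done-flags for the three keys, with the same last-section-wins and truthy-description-only updates, and assembles the parts list by filtering a tuple instead of A's if-append chain.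
import Mathlib
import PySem

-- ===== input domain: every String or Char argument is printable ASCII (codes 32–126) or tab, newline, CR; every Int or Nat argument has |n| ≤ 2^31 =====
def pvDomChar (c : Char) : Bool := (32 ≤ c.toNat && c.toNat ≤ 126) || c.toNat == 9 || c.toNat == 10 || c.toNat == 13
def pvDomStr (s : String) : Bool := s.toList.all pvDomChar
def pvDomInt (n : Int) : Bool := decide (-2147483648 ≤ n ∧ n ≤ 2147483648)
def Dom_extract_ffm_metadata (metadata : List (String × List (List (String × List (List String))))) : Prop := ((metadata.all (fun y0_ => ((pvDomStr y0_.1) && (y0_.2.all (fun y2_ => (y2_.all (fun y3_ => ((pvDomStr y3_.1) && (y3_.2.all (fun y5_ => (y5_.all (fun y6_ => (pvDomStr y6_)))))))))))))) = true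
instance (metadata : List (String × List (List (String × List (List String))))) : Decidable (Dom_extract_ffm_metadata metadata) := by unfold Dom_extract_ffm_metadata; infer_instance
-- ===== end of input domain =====

-- B replaces A's three separate scans of the opengraph sections by one combined pass with
-- per-section done-flags; both ports model the caught IndexError (try/except) as Option none
-- turned into the constant error string, exactly as the Python returns it.

-- ===== PORT A =====
-- one of A's title/image inner loops over a section's properties: first `key` wins, `break` keeps acc
def pvAScanKey (key : String) (props : List (List String)) (acc : Option String) :
    Option (Option String) :=
  match props with
  | [] => some acc
  | p :: rest =>
    match PySem.List.pyGet? p 0 with          -- prop[0] (IndexError → none)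
    | none => none
    | some k =>
      if k = key then
        match PySem.List.pyGet? p 1 with      -- prop[1]
        | none => none
        | some v => some (some v)             -- assign then break
      else pvAScanKey key rest acc

-- A's description inner loop: artist overwritten only when desc is truthy, break regardless
def pvAScanDesc (props : List (List String)) (acc : Option String) : Option (Option String) :=
  match props with
  | [] => some acc
  | p :: rest =>
    match PySem.List.pyGet? p 0 with
    | none => none
    | some k =>
      if k = "og:description" then
        match PySem.List.pyGet? p 1 with
        | none => none
        | some desc => some (if desc ≠ "" then some (PySem.Str.strip desc) else acc)
      else pvAScanDesc rest acc

-- A's outer loops over og_sections ('properties' looked up with default [])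
def pvAFoldTitle (secs : List (List (String × List (List String)))) (acc : Option String) :
    Option (Option String) :=
  match secs with
  | [] => some acc
  | s :: rest =>
    match pvAScanKey "og:title" ((s.lookup "properties").getD []) acc with
    | none => none
    | some acc' => pvAFoldTitle rest acc'

def pvAFoldDesc (secs : List (List (String × List (List String)))) (acc : Option String) :
    Option (Option String) :=
  match secs with
  | [] => some acc
  | s :: rest =>
    match pvAScanDesc ((s.lookup "properties").getD []) acc with
    | none => none
    | some acc' => pvAFoldDesc rest acc'

def pvAFoldImage (secs : List (List (String × List (List String)))) (acc : Option String) :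
    Option (Option String) :=
  match secs with
  | [] => some acc
  | s :: rest =>
    match pvAScanKey "og:image" ((s.lookup "properties").getD []) acc with
    | none => none
    | some acc' => pvAFoldImage rest acc'

-- A's parts building: successive `if x:` appends (Python truthiness: some non-empty string)
def pvAParts (title artist image : Option String) : List String :=
  let parts : List String := []
  let parts := match title with
    | some s => if s ≠ "" then parts ++ ["title - " ++ s] else parts
    | none => parts
  let parts := match artist with
    | some s => if s ≠ "" then parts ++ ["artist - " ++ s] else parts
    | none => parts
  let parts := match image with
    | some s => if s ≠ "" then parts ++ ["image - " ++ s] else parts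
    | none => parts
  parts

def extract_ffm_metadata (metadata : List (String × List (List (String × List (List String))))) : String :=
  let res : Option String :=                         -- none = an uncaught-in-the-body IndexError
    match metadata.lookup "opengraph" with           -- 'opengraph' in metadata / metadata['opengraph']
    | none =>
      some (let parts := pvAParts none none none
            if parts = [] then "ffm - metadata extracted" else PySem.Str.join " | " parts)
    | some secs =>
      match pvAFoldTitle secs none with
      | none => none
      | some title =>
        match pvAFoldDesc secs none with
        | none => none
        | some artist =>
          match pvAFoldImage secs none with
          | none => none
          | some image =>
            some (let parts := pvAParts title artist image
                  if parts = [] then "ffm - metadata extracted" else PySem.Str.join " | " parts)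
  match res with
  | some s => s
  -- except Exception: the only reachable exception is IndexError with this constant message
  | none => "ffm - extraction error: list index out of range"

-- ===== PORT B =====
-- B's single combined scan of one section; fl = (t_done, d_done, i_done), st = (title, artist, image)
def pvBScan (props : List (List String))
    (st : Option String × Option String × Option String)
    (fl : Bool × Bool × Bool) :
    Option (Option String × Option String × Option String) :=
  match props with
  | [] => some st
  | p :: rest =>
    if fl.1 && fl.2.1 && fl.2.2 then some st        -- break: all three found in this section
    else
      match PySem.List.pyGet? p 0 with              -- key = prop[0]
      | none => none
      | some key =>
        if !fl.1 && key = "og:title" then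
          match PySem.List.pyGet? p 1 with
          | none => none
          | some v => pvBScan rest (some v, st.2.1, st.2.2) (true, fl.2.1, fl.2.2)
        else if !fl.2.1 && key = "og:description" then
          match PySem.List.pyGet? p 1 with
          | none => none
          | some desc =>
            pvBScan rest
              (st.1, if desc ≠ "" then some (PySem.Str.strip desc) else st.2.1, st.2.2)
              (fl.1, true, fl.2.2)
        else if !fl.2.2 && key = "og:image" then
          match PySem.List.pyGet? p 1 with
          | none => none
          | some v => pvBScan rest (st.1, st.2.1, some v) (fl.1, fl.2.1, true)
        else pvBScan rest st fl

-- B's outer loop: one pass over the sections, threading (title, artist, image)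
def pvBFold (secs : List (List (String × List (List String))))
    (st : Option String × Option String × Option String) :
    Option (Option String × Option String × Option String) :=
  match secs with
  | [] => some st
  | s :: rest =>
    match pvBScan ((s.lookup "properties").getD []) st (false, false, false) with
    | none => none
    | some st' => pvBFold rest st'

-- B's parts: [p for p in (x and f"…", …) if p]
def pvBParts (t a i : Option String) : List String :=
  let cands : List (Option String) :=
    [t.map (fun s => if s = "" then "" else "title - " ++ s),
     a.map (fun s => if s = "" then "" else "artist - " ++ s),
     i.map (fun s => if s = "" then "" else "image - " ++ s)]
  (cands.filterMap id).filter (fun p => p ≠ "")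

def extract_ffm_metadata_alt (metadata : List (String × List (List (String × List (List String))))) : String :=
  match pvBFold ((metadata.lookup "opengraph").getD []) (none, none, none) with
  | none => "ffm - extraction error: list index out of range"   -- the caught IndexError
  | some (t, a, i) =>
    let parts := pvBParts t a i
    if parts = [] then "ffm - metadata extracted" else PySem.Str.join " | " parts

-- ===== PRECONDITION & SPEC =====
def Spec_extract_ffm_metadata (metadata : List (String × List (List (String × List (List String))))) (out : String) : Prop := out = extract_ffm_metadata_alt metadata
instance (metadata : List (String × List (List (String × List (List String))))) (out : String) : Decidable (Spec_extract_ffm_metadata metadata out) := by unfold Spec_extract_ffm_metadata; infer_instance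

-- ===== CLAIM (what is proved, stated in full; the proofs are below) =====
def Claim_equal_extract_ffm_metadata : Prop := ∀ (metadata : List (String × List (List (String × List (List String))))), Dom_extract_ffm_metadata metadata → Spec_extract_ffm_metadata metadata (extract_ffm_metadata metadata)

-- ===== LEMMAS AND PROOFS =====

-- combine the three independent scans, erroring if any errors
def pvJoin3 (x y z : Option (Option String)) :
    Option (Option String × Option String × Option String) :=
  match x, y, z with
  | some t, some a, some i => some (t, a, i)
  | _, _, _ => none

theorem pvBScan_eq (props : List (List String)) :
    ∀ (t a i : Option String) (tD dD iD : Bool),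
    pvBScan props (t, a, i) (tD, dD, iD) =
      pvJoin3 (if tD then some t else pvAScanKey "og:title" props t)
              (if dD then some a else pvAScanDesc props a)
              (if iD then some i else pvAScanKey "og:image" props i) := by
  induction props with
  | nil =>
    intro t a i tD dD iD
    cases tD <;> cases dD <;> cases iD <;> simp [pvBScan, pvAScanKey, pvAScanDesc, pvJoin3]
  | cons p rest ih =>
    intro t a i tD dD iD
    cases h0 : PySem.List.pyGet? p 0 with
    | none =>
      cases tD <;> cases dD <;> cases iD <;>
        simp [pvBScan, pvAScanKey, pvAScanDesc, pvJoin3, h0]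
    | some key =>
      by_cases hT : key = "og:title"
      · subst hT
        cases h1 : PySem.List.pyGet? p 1 with
        | none =>
          cases tD <;> cases dD <;> cases iD <;>
            simp [pvBScan, pvAScanKey, pvAScanDesc, pvJoin3, h0, h1, ih]
        | some v =>
          cases tD <;> cases dD <;> cases iD <;>
            simp [pvBScan, pvAScanKey, pvAScanDesc, pvJoin3, h0, h1, ih]
      · by_cases hD : key = "og:description"
        · subst hD
          cases h1 : PySem.List.pyGet? p 1 with
          | none =>
            cases tD <;> cases dD <;> cases iD <;>
              simp [pvBScan, pvAScanKey, pvAScanDesc, pvJoin3, h0, h1, ih]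
          | some v =>
            cases tD <;> cases dD <;> cases iD <;>
              simp [pvBScan, pvAScanKey, pvAScanDesc, pvJoin3, h0, h1, ih]
        · by_cases hI : key = "og:image"
          · subst hI
            cases h1 : PySem.List.pyGet? p 1 with
            | none =>
              cases tD <;> cases dD <;> cases iD <;>
                simp [pvBScan, pvAScanKey, pvAScanDesc, pvJoin3, h0, h1, ih]
            | some v =>
              cases tD <;> cases dD <;> cases iD <;>
                simp [pvBScan, pvAScanKey, pvAScanDesc, pvJoin3, h0, h1, ih]
          · cases tD <;> cases dD <;> cases iD <;>
              simp [pvBScan, pvAScanKey, pvAScanDesc, pvJoin3, h0, hT, hD, hI, ih]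

theorem pvBFold_eq (secs : List (List (String × List (List String)))) :
    ∀ (t a i : Option String),
    pvBFold secs (t, a, i) =
      pvJoin3 (pvAFoldTitle secs t) (pvAFoldDesc secs a) (pvAFoldImage secs i) := by
  induction secs with
  | nil => intro t a i; simp [pvBFold, pvAFoldTitle, pvAFoldDesc, pvAFoldImage, pvJoin3]
  | cons s rest ih =>
    intro t a i
    rw [pvBFold, pvBScan_eq]
    cases hT : pvAScanKey "og:title" ((s.lookup "properties").getD []) t with
    | none =>
      simp [pvJoin3, pvAFoldTitle, pvAFoldDesc, pvAFoldImage, hT]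
    | some t' =>
      cases hD : pvAScanDesc ((s.lookup "properties").getD []) a with
      | none =>
        simp [pvJoin3, pvAFoldTitle, pvAFoldDesc, pvAFoldImage, hT, hD]
      | some a' =>
        cases hI : pvAScanKey "og:image" ((s.lookup "properties").getD []) i with
        | none => simp [pvJoin3, pvAFoldTitle, pvAFoldDesc, pvAFoldImage, hT, hD, hI]
        | some i' =>
          simp [pvJoin3, pvAFoldTitle, pvAFoldDesc, pvAFoldImage, hT, hD, hI, ih]

theorem pvParts_eq (t a i : Option String) : pvBParts t a i = pvAParts t a i := by
  cases t <;> cases a <;> cases i <;>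
    simp [pvBParts, pvAParts, List.filterMap, List.filter] <;>
    split_ifs <;> simp_all

-- ===== VERDICT (by name: the statement is the Claim_ definition above) =====
theorem extract_ffm_metadata_spec : Claim_equal_extract_ffm_metadata := by
  intro metadata _
  unfold Spec_extract_ffm_metadata extract_ffm_metadata extract_ffm_metadata_alt
  cases hog : metadata.lookup "opengraph" with
  | none => simp [pvBFold, pvParts_eq]
  | some secs =>
    simp only [Option.getD_some]
    rw [pvBFold_eq]
    cases hT : pvAFoldTitle secs none with
    | none => simp [pvJoin3]
    | some title =>
      cases hD : pvAFoldDesc secs none with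
      | none => simp [pvJoin3]
      | some artist =>
        cases hI : pvAFoldImage secs none with
        | none => simp [pvJoin3]
        | some image => simp [pvJoin3, pvParts_eq]
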